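-- pv_equiv track=rewrite | github.com/AliMiraftab/transformers | src/tokenizer.py | tokenized_sequence
-- ===== SOURCE A (Python) =====
-- from pprint import pprint
--
-- split_characters = ['(', ')', ',', '?', '!', ':', '.']
--
-- def tokenized_sequence(sequence):
--     for c in split_characters:
--         sequence = sequence.replace(c, " "+c+" ")
--     tokenized_s = [w.strip() for w in sequence.split() if sequence != ""]
--     pprint(
--         {'sequence': sequence,
--          'token': tokenized_s}
--     )
--     return tokenized_s
-- ===== SOURCE B (Python) =====
-- split_characters = ['(', ')', ',', '?', '!', ':', '.']
--
-- def tokenized_sequence(sequence):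
--     # One left-to-right scan instead of 7 whole-string replace passes + split.
--     # (A also pprints a dict as a side effect; this re-implementation returns the
--     # same token list but does not print.)
--     tokens = []
--     word = []
--     for ch in sequence:
--         if ch in split_characters:
--             if word:
--                 tokens.append(''.join(word))
--                 word = []
--             tokens.append(ch)
--         elif ch.isspace():
--             if word:
--                 tokens.append(''.join(word))
--                 word = []
--         else:
--             word.append(ch)
--     if word:
--         tokens.append(''.join(word))
--     return tokens
-- ===== Notes on version B (the rewrite author's own statement) =====
-- stated objective: alternative
-- what changed: Replaces the 7 sequential full-string replace passes plus split-and-strip with a single left-to-right character scan that emits the tokens directly (A's pprint side effect is dropped).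
import Mathlib
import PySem

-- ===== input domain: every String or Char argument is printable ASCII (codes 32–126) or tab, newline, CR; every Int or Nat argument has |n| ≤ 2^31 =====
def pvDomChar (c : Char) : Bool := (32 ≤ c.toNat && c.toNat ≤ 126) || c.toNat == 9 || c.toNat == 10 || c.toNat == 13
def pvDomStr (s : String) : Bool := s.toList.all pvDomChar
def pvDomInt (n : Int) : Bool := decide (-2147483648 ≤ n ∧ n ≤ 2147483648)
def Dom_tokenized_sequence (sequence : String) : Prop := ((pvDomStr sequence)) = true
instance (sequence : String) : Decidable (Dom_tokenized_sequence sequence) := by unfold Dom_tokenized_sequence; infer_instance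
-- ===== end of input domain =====

-- B replaces A's 7 whole-string replace passes with one left-to-right character scan; equality is about the
-- RETURN value only — A's pprint side effect is not ported and B does not print.

-- ===== PORT A =====
def split_characters : List String := ["(", ")", ",", "?", "!", ":", "."]

def tokenized_sequence (sequence : String) : List String :=
  let t := split_characters.foldl (fun s c => PySem.Str.replace s c (" " ++ c ++ " ")) sequence
  (PySem.Str.split₀ t).filterMap (fun w => if t = "" then none else some (PySem.Str.strip w))

-- ===== PORT B =====
def pvSplitChars : List Char := ['(', ')', ',', '?', '!', ':', '.']

-- the scan loop of Source B: `word` is the pending word, `tokens` the tokens emitted so far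
-- (''.join(word) is ported as String.ofList)
def pvScan : List Char → List Char → List String → List String
  | [], word, tokens => if word ≠ [] then tokens ++ [String.ofList word] else tokens
  | ch :: rest, word, tokens =>
      if ch ∈ pvSplitChars then
        pvScan rest [] ((if word ≠ [] then tokens ++ [String.ofList word] else tokens) ++ [String.ofList [ch]])
      else if PySem.Chars.isspace ch then
        pvScan rest [] (if word ≠ [] then tokens ++ [String.ofList word] else tokens)
      else
        pvScan rest (word ++ [ch]) tokens

def tokenized_sequence_alt (sequence : String) : List String :=
  pvScan sequence.toList [] []

-- ===== PRECONDITION & SPEC =====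
def Spec_tokenized_sequence (sequence : String) (out : List String) : Prop := out = tokenized_sequence_alt sequence
instance (sequence : String) (out : List String) : Decidable (Spec_tokenized_sequence sequence out) := by unfold Spec_tokenized_sequence; infer_instance

-- ===== CLAIM (what is proved, stated in full; the proofs are below) =====
def Claim_equal_tokenized_sequence : Prop := ∀ (sequence : String), Dom_tokenized_sequence sequence → Spec_tokenized_sequence sequence (tokenized_sequence sequence)

-- ===== LEMMAS AND PROOFS =====

-- what one original character contributes to A's string after the replaces for the chars in P are done
def padOf (P : List Char) (x : Char) : List Char := if x ∈ P then [' ', x, ' '] else [x]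

-- definitional equations of split₀'s worker, taken once so every later step is a plain rw
theorem go_nil (cur : List Char) (acc : List (List Char)) :
    PySem.Chars.split₀.go [] cur acc
      = if cur.isEmpty then acc.reverse else (cur.reverse :: acc).reverse := rfl

theorem go_cons (c : Char) (rest cur : List Char) (acc : List (List Char)) :
    PySem.Chars.split₀.go (c :: rest) cur acc
      = if PySem.Chars.isspace c then
          (if cur.isEmpty then PySem.Chars.split₀.go rest [] acc
           else PySem.Chars.split₀.go rest [] (cur.reverse :: acc))
        else PySem.Chars.split₀.go rest (c :: cur) acc := rfl

-- one scanning step at a time (each equation has a single worker call on each side)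
theorem go_space (c : Char) (hc : PySem.Chars.isspace c = true) (rest cur : List Char)
    (acc : List (List Char)) :
    PySem.Chars.split₀.go (c :: rest) cur acc
      = PySem.Chars.split₀.go rest [] (if cur.isEmpty then acc else cur.reverse :: acc) := by
  rw [go_cons, if_pos hc]
  by_cases h : cur.isEmpty
  · rw [if_pos h, if_pos h]
  · rw [if_neg h, if_neg h]

theorem go_nonspace (x : Char) (hsx : PySem.Chars.isspace x = false) (rest cur : List Char)
    (acc : List (List Char)) :
    PySem.Chars.split₀.go (x :: rest) cur acc = PySem.Chars.split₀.go rest (x :: cur) acc := by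
  rw [go_cons, if_neg (by simp [hsx])]

theorem split_chars_not_space : ∀ c ∈ pvSplitChars, PySem.Chars.isspace c = false := by
  intro c hc
  fin_cases hc <;> rfl

theorem split_chars_not_blank : ∀ c ∈ pvSplitChars, c ≠ ' ' := by
  intro c hc
  fin_cases hc <;> decide

theorem replace_go_single (c : Char) (new : List Char) :
    ∀ (fuel : Nat) (l acc : List Char), l.length ≤ fuel →
      PySem.Chars.replace.go [c] new fuel l acc
        = acc.reverse ++ l.flatMap (fun x => if x = c then new else [x]) := by
  intro fuel
  induction fuel with
  | zero =>
    intro l acc h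
    have hl : l = [] := List.eq_nil_of_length_eq_zero (Nat.le_zero.mp h)
    subst hl
    simp [PySem.Chars.replace.go]
  | succ n ih =>
    intro l acc h
    cases l with
    | nil => simp [PySem.Chars.replace.go]
    | cons x t =>
      have ht : t.length ≤ n := by simp at h; omega
      by_cases hx : x = c
      · subst hx
        have hp : [x].isPrefixOf (x :: t) = true := by simp [List.isPrefixOf]
        simp only [PySem.Chars.replace.go, hp, if_pos, List.length_cons, List.length_nil,
          List.drop_succ_cons, List.drop_zero]
        rw [ih t (new.reverse ++ acc) ht]
        simp
      · have hp : [c].isPrefixOf (x :: t) = false := by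
          simp [List.isPrefixOf]
          exact fun hcx => (hx hcx.symm).elim
        simp only [PySem.Chars.replace.go, hp]
        rw [ih t (x :: acc) ht]
        simp [hx]

theorem replace_single (l : List Char) (c : Char) (new : List Char) :
    PySem.Chars.replace l [c] new = l.flatMap (fun x => if x = c then new else [x]) := by
  simp [PySem.Chars.replace, replace_go_single c new l.length l [] le_rfl]

theorem pad_step (l : List Char) (P : List Char) (c : Char) (hc : c ∉ P) (hsp : c ≠ ' ') :
    PySem.Chars.replace (l.flatMap (padOf P)) [c] [' ', c, ' '] = l.flatMap (padOf (P ++ [c])) := by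
  rw [replace_single, List.flatMap_assoc]
  refine List.flatMap_congr ?_
  intro x _
  by_cases hxP : x ∈ P
  · have hxc : x ≠ c := fun h => hc (h ▸ hxP)
    simp [padOf, hxP, hxc, Ne.symm hsp]
  · by_cases hxc : x = c
    · subst hxc; simp [padOf, hxP]
    · simp [padOf, hxP, hxc]

theorem foldC (S : List Char) : ∀ (P : List Char) (l : List Char), pvSplitChars = P ++ S →
    S.foldl (fun t c => PySem.Chars.replace t [c] [' ', c, ' ']) (l.flatMap (padOf P))
      = l.flatMap (padOf pvSplitChars) := by
  induction S with
  | nil => intro P l h; simp at h; simp [h]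
  | cons c S ih =>
    intro P l h
    have hnd : pvSplitChars.Nodup := by decide
    have hcP : c ∉ P := by
      rw [h] at hnd
      exact fun hm => (List.disjoint_of_nodup_append hnd) hm (by simp)
    have hcs : c ∈ pvSplitChars := by rw [h]; simp
    have hsp : c ≠ ' ' := split_chars_not_blank c hcs
    simp only [List.foldl_cons]
    rw [pad_step l P c hcP hsp, ih (P ++ [c]) l (by simpa using h)]

-- A's seven string-level replaces, moved to the character level in one go
theorem foldA_toList (s : String) :
    (split_characters.foldl (fun t c => PySem.Str.replace t c (" " ++ c ++ " ")) s).toList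
      = s.toList.flatMap (padOf pvSplitChars) := by
  have hspc : (" " : String).toList = [' '] := by decide
  have key : ∀ (ss : List String) (cs : List Char),
      ss.map String.toList = cs.map (fun c => [c]) → ∀ (t : String),
      ((ss.foldl (fun t c => PySem.Str.replace t c (" " ++ c ++ " ")) t)).toList
        = cs.foldl (fun l c => PySem.Chars.replace l [c] [' ', c, ' ']) t.toList := by
    intro ss
    induction ss with
    | nil =>
      intro cs h t
      have : cs = [] := by
        cases cs with
        | nil => rfl
        | cons c cs => simp at h
      subst this
      rfl
    | cons u ss ih =>
      intro cs h t
      cases cs with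
      | nil => simp at h
      | cons c cs =>
        simp only [List.map_cons, List.cons.injEq] at h
        obtain ⟨hu, hrest⟩ := h
        simp only [List.foldl_cons]
        rw [ih cs hrest]
        congr 1
        rw [PySem.Str.toList_replace, String.toList_append, String.toList_append, hspc, hu]
        simp
  have hsc : split_characters.map String.toList = pvSplitChars.map (fun c => [c]) := by decide
  have h0 : ∀ (l : List Char), l.flatMap (padOf []) = l := by
    intro l
    induction l with
    | nil => rfl
    | cons a t iht =>
      rw [List.flatMap_cons, iht, show padOf [] a = [a] from rfl, List.singleton_append]
  have h2 := foldC pvSplitChars [] s.toList rfl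
  rw [h0 s.toList] at h2
  rw [key split_characters pvSplitChars hsc s]
  exact h2

-- words produced by split() are nonempty and whitespace-free
theorem split₀_go_words : ∀ (l cur : List Char) (acc : List (List Char)),
    (∀ c ∈ cur, PySem.Chars.isspace c = false) →
    (∀ w ∈ acc, w ≠ [] ∧ ∀ c ∈ w, PySem.Chars.isspace c = false) →
    ∀ w ∈ PySem.Chars.split₀.go l cur acc, w ≠ [] ∧ ∀ c ∈ w, PySem.Chars.isspace c = false := by
  intro l
  induction l with
  | nil =>
    intro cur acc hcur hacc w hw
    rw [go_nil] at hw
    by_cases h : cur.isEmpty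
    · rw [if_pos h] at hw
      exact hacc w (List.mem_reverse.mp hw)
    · rw [if_neg h, List.reverse_cons] at hw
      rcases List.mem_append.mp hw with hw | hw
      · exact hacc w (List.mem_reverse.mp hw)
      · have hw : w = cur.reverse := by simpa using hw
        subst hw
        refine ⟨by simpa [List.isEmpty_iff] using h, ?_⟩
        intro c hc
        exact hcur c (List.mem_reverse.mp hc)
  | cons x r ih =>
    intro cur acc hcur hacc w hw
    rw [go_cons] at hw
    by_cases hsx : PySem.Chars.isspace x
    · rw [if_pos hsx] at hw
      by_cases h : cur.isEmpty
      · rw [if_pos h] at hw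
        exact ih [] acc (by simp) hacc w hw
      · rw [if_neg h] at hw
        refine ih [] _ (by simp) ?_ w hw
        intro v hv
        rcases List.mem_cons.mp hv with hv | hv
        · subst hv
          refine ⟨by simpa [List.isEmpty_iff] using h, ?_⟩
          intro c hc
          exact hcur c (List.mem_reverse.mp hc)
        · exact hacc v hv
    · rw [if_neg hsx] at hw
      refine ih (x :: cur) acc ?_ hacc w hw
      intro c hc
      rcases List.mem_cons.mp hc with hc | hc
      · subst hc
        simpa using hsx
      · exact hcur c hc

theorem strip_id (w : List Char) (h : ∀ c ∈ w, PySem.Chars.isspace c = false) :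
    PySem.Chars.strip w = w := by
  have hd : ∀ (v : List Char), (∀ c ∈ v, PySem.Chars.isspace c = false) →
      v.dropWhile PySem.Chars.isspace = v := by
    intro v hv
    cases v with
    | nil => rfl
    | cons c t => simp [List.dropWhile, hv c (by simp)]
  simp [PySem.Chars.strip, PySem.Chars.lstrip, PySem.Chars.rstrip, hd w h,
        hd w.reverse (fun c hc => h c (List.mem_reverse.mp hc))]

theorem strip_ofList (w : List Char) :
    PySem.Str.strip (String.ofList w) = String.ofList (PySem.Chars.strip w) := by
  have h : (PySem.Str.strip (String.ofList w)).toList = PySem.Chars.strip w := by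
    rw [PySem.Str.toList_strip, String.toList_ofList]
  have h2 := congrArg String.ofList h
  rw [String.ofList_toList] at h2
  exact h2

-- the scan of Source B on the raw characters equals split() of A's padded string, accumulator form
theorem scan_eq_padded_go : ∀ (l cur : List Char) (acc : List (List Char)),
    pvScan l cur.reverse (acc.reverse.map String.ofList)
      = (PySem.Chars.split₀.go (l.flatMap (padOf pvSplitChars)) cur acc).map String.ofList := by
  intro l
  induction l with
  | nil =>
    intro cur acc
    rw [List.flatMap_nil, go_nil]
    by_cases h : cur.isEmpty
    · have hc : cur = [] := by simpa [List.isEmpty_iff] using h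
      subst hc
      simp [pvScan]
    · have hne : cur.reverse ≠ [] := by simpa [List.isEmpty_iff] using h
      rw [if_neg h]
      simp [pvScan, hne]
  | cons x r ih =>
    intro cur acc
    rw [List.flatMap_cons]
    by_cases hx : x ∈ pvSplitChars
    · have hsx : PySem.Chars.isspace x = false := split_chars_not_space x hx
      have hpadx : padOf pvSplitChars x = [' ', x, ' '] := by simp [padOf, hx]
      rw [hpadx]
      simp only [List.cons_append, List.nil_append]
      show pvScan (x :: r) cur.reverse (acc.reverse.map String.ofList) = _
      simp only [pvScan]
      rw [if_pos hx, go_space ' ' rfl, go_nonspace x hsx, go_space ' ' rfl,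
        if_neg (by simp : ¬(([x] : List Char).isEmpty = true))]
      by_cases h : cur.isEmpty
      · have hc : cur = [] := by simpa [List.isEmpty_iff] using h
        subst hc
        simpa using ih [] ([x] :: acc)
      · have hne : cur.reverse ≠ [] := by simpa [List.isEmpty_iff] using h
        simp only [if_neg h]
        simpa [hne] using ih [] ([x] :: (cur.reverse :: acc))
    · have hpadx : padOf pvSplitChars x = [x] := by simp [padOf, hx]
      rw [hpadx, List.singleton_append]
      show pvScan (x :: r) cur.reverse (acc.reverse.map String.ofList) = _
      simp only [pvScan]
      rw [if_neg hx]
      by_cases hsx : PySem.Chars.isspace x = true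
      · rw [if_pos hsx, go_space x hsx]
        by_cases h : cur.isEmpty
        · have hc : cur = [] := by simpa [List.isEmpty_iff] using h
          subst hc
          simpa using ih [] acc
        · have hne : cur.reverse ≠ [] := by simpa [List.isEmpty_iff] using h
          simp only [if_neg h]
          simpa [hne] using ih [] (cur.reverse :: acc)
      · have hsx' : PySem.Chars.isspace x = false := by simpa using hsx
        rw [if_neg hsx, go_nonspace x hsx']
        have hrw : cur.reverse ++ [x] = (x :: cur).reverse := by simp
        rw [hrw]
        exact ih (x :: cur) acc

theorem pad_nil_iff (l : List Char) : l.flatMap (padOf pvSplitChars) = [] ↔ l = [] := by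
  cases l with
  | nil => simp
  | cons x r =>
    simp only [List.flatMap_cons, padOf]
    constructor
    · intro h
      by_cases hx : x ∈ pvSplitChars <;> simp [hx] at h
    · intro h; exact absurd h (by simp)

-- ===== VERDICT (by name: the statement is the Claim_ definition above) =====
theorem tokenized_sequence_spec : Claim_equal_tokenized_sequence := by
  intro s _
  unfold Spec_tokenized_sequence tokenized_sequence tokenized_sequence_alt
  set t := split_characters.foldl (fun t c => PySem.Str.replace t c (" " ++ c ++ " ")) s with ht
  have htl : t.toList = s.toList.flatMap (padOf pvSplitChars) := foldA_toList s
  by_cases hs : s.toList = []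
  · have ht0 : t = "" := by
      have h1 : t.toList = [] := by rw [htl, hs]; rfl
      have h2 := congrArg String.ofList h1
      rw [String.ofList_toList] at h2
      exact h2
    rw [hs]
    simp [ht0, pvScan]
  · have ht0 : t ≠ "" := by
      intro h
      exact hs ((pad_nil_iff s.toList).mp (by rw [← htl, h]; rfl))
    simp only [if_neg ht0]
    have hsplit : PySem.Str.split₀ t = (PySem.Chars.split₀ t.toList).map String.ofList := by
      have h1 := PySem.Str.split₀_map_toList t
      rw [← h1, List.map_map]
      have h3 : (PySem.Str.split₀ t).map (String.ofList ∘ String.toList)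
          = (PySem.Str.split₀ t).map id :=
        List.map_congr_left (fun w _ => by simp)
      rw [h3, List.map_id]
    have hwords : ∀ w ∈ PySem.Chars.split₀ t.toList, ∀ c ∈ w, PySem.Chars.isspace c = false := by
      intro w hw
      exact (split₀_go_words t.toList [] [] (by simp) (by simp) w hw).2
    calc (PySem.Str.split₀ t).filterMap (fun w => some (PySem.Str.strip w))
        = (PySem.Str.split₀ t).map PySem.Str.strip := by
          simp
      _ = ((PySem.Chars.split₀ t.toList).map String.ofList).map PySem.Str.strip := by
          rw [hsplit]
      _ = (PySem.Chars.split₀ t.toList).map String.ofList := by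
          rw [List.map_map]
          refine List.map_congr_left ?_
          intro w hw
          simp only [Function.comp_apply]
          rw [strip_ofList, strip_id w (hwords w hw)]
      _ = pvScan s.toList [] [] := by
          rw [htl]
          rw [show PySem.Chars.split₀ (s.toList.flatMap (padOf pvSplitChars))
                = PySem.Chars.split₀.go (s.toList.flatMap (padOf pvSplitChars)) [] [] from rfl]
          rw [← scan_eq_padded_go s.toList [] []]
          simp
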